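-- pv_equiv track=rewrite | github.com/lzr1130/auto_nonograms | solver.py | filter_patterns
-- ===== SOURCE A (Python) =====
-- def filter_patterns(patterns, current):
--     res = []
--     for p in patterns:
--         ok = True
--         for a, b in zip(p, current):
--             if b != -1 and a != b:
--                 ok = False
--                 break
--         if ok:
--             res.append(p)
--     return res
-- ===== SOURCE B (Python) =====
-- def filter_patterns(patterns, current):
--     res = list(patterns)
--     for i, v in enumerate(current):
--         if v != -1:
--             res = [p for p in res if i >= len(p) or p[i] == v]
--     return res
-- ===== Notes on version B (the rewrite author's own statement) =====
-- stated objective: alternative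
-- what changed: Swaps the loop nesting: instead of scanning every pattern against the whole constraint vector, B sieves the pattern list with one stable filtering pass per constrained position, narrowing the survivors constraint by constraint.
import Mathlib
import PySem

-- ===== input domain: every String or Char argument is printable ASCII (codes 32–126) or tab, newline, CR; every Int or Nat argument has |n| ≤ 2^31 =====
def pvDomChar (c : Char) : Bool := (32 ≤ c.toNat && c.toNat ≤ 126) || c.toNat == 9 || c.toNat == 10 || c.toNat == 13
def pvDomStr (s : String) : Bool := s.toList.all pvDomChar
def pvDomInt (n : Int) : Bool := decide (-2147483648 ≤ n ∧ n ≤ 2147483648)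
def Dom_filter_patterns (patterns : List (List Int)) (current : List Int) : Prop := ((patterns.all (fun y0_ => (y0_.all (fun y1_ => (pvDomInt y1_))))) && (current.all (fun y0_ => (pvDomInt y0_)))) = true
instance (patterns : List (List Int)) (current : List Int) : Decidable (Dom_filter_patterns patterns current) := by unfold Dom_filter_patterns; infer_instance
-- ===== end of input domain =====

-- B swaps the loop nesting: one stable filtering pass over the surviving patterns
-- per constrained position of `current`, instead of A's per-pattern full zip scan.
-- ===== PORT A =====
-- inner 'for a, b in zip(p, current): if b != -1 and a != b: ok = False; break'
def pvCheckA : List (Int × Int) → Bool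
  | [] => true
  | (a, b) :: rest => if b != -1 && a != b then false else pvCheckA rest

def filter_patterns (patterns : List (List Int)) (current : List Int) : List (List Int) :=
  patterns.foldl (fun res p => if pvCheckA (p.zip current) then res ++ [p] else res) []

-- ===== PORT B =====
-- 'i >= len(p) or p[i] == v' for one constrained position (i, v)
def pvKeepB (iv : Int × Int) (p : List Int) : Bool :=
  decide ((p.length : Int) ≤ iv.1) || (PySem.List.pyGet? p iv.1 == some iv.2)

def filter_patterns_alt (patterns : List (List Int)) (current : List Int) : List (List Int) :=
  (PySem.List.enumerate current 0).foldl
    (fun res iv => if iv.2 != -1 then res.filter (pvKeepB iv) else res)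
    patterns

-- ===== PRECONDITION & SPEC =====
def Spec_filter_patterns (patterns : List (List Int)) (current : List Int) (out : List (List Int)) : Prop := out = filter_patterns_alt patterns current
instance (patterns : List (List Int)) (current : List Int) (out : List (List Int)) : Decidable (Spec_filter_patterns patterns current out) := by unfold Spec_filter_patterns; infer_instance

-- ===== CLAIM (what is proved, stated in full; the proofs are below) =====
def Claim_equal_filter_patterns : Prop := ∀ (patterns : List (List Int)) (current : List Int), Dom_filter_patterns patterns current → Spec_filter_patterns patterns current (filter_patterns patterns current)

-- ===== LEMMAS AND PROOFS =====

-- A's inner scan accepts p iff every in-range constrained position agrees.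
theorem pvCheckA_iff (p cur : List Int) :
    pvCheckA (p.zip cur) = true ↔
      ∀ (k : Nat) (h1 : k < p.length) (h2 : k < cur.length), cur[k] ≠ -1 → p[k] = cur[k] := by
  induction p generalizing cur with
  | nil => simp [pvCheckA]
  | cons a p ih =>
    cases cur with
    | nil => simp [pvCheckA]
    | cons b cur =>
      simp only [List.zip_cons_cons, pvCheckA]
      split_ifs with h
      · constructor
        · intro hf; cases hf
        · intro hall
          have := hall 0 (by simp) (by simp)
          simp at this h
          exact absurd (this h.1) h.2
      · rw [ih]
        constructor
        · intro hall k h1 h2 hne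
          cases k with
          | zero =>
            simp at h hne ⊢
            exact h hne
          | succ k => exact hall k (by simpa using h1) (by simpa using h2) (by simpa using hne)
        · intro hall k h1 h2 hne
          exact hall (k+1) (by simpa using h1) (by simpa using h2) (by simpa using hne)

-- the staged sieve over any list of (index, value) pairs is one filter by the conjunction
theorem sieve_eq_filter (cs : List (Int × Int)) (l : List (List Int)) :
    cs.foldl (fun res iv => if iv.2 != -1 then res.filter (pvKeepB iv) else res) l
      = l.filter (fun p => cs.all (fun iv => iv.2 == -1 || pvKeepB iv p)) := by
  induction cs generalizing l with
  | nil => simp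
  | cons iv cs ih =>
    simp only [List.foldl_cons, List.all_cons, ih]
    by_cases h : iv.2 = -1
    · simp [h]
    · rw [if_pos (by simp [h]), List.filter_filter]
      apply List.filter_congr
      intro p _
      simp [beq_eq_false_iff_ne.mpr h, Bool.and_comm]

-- B's combined predicate accepts p iff every in-range constrained position agrees.
theorem pvAllB_iff (p cur : List Int) :
    (PySem.List.enumerate cur 0).all (fun iv => iv.2 == -1 || pvKeepB iv p) = true ↔
      ∀ (k : Nat) (h1 : k < p.length) (h2 : k < cur.length), cur[k] ≠ -1 → p[k] = cur[k] := by
  rw [List.all_eq_true]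
  constructor
  · intro hall k h1 h2 hne
    have hmem : ((0 : Int) + k, cur[k]) ∈ PySem.List.enumerate cur 0 := by
      rw [PySem.List.mem_enumerate_iff]; exact ⟨k, h2, rfl⟩
    have := hall _ hmem
    simp only [zero_add, pvKeepB] at this
    rcases Bool.or_eq_true _ _ |>.mp this with hv | hkeep
    · exact absurd (by simpa using hv) hne
    rcases Bool.or_eq_true _ _ |>.mp hkeep with hlen | hget
    · exact absurd (by exact_mod_cast of_decide_eq_true hlen) (not_le_of_gt h1)
    · rw [PySem.List.pyGet?_natCast] at hget
      simpa [List.getElem?_eq_getElem h1] using hget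
  · intro hall iv hmem
    rw [PySem.List.mem_enumerate_iff] at hmem
    obtain ⟨k, hk, rfl⟩ := hmem
    simp only [zero_add, pvKeepB]
    by_cases hv : cur[k] = -1
    · simp [hv]
    by_cases h1 : k < p.length
    · have := hall k h1 hk hv
      rw [PySem.List.pyGet?_natCast]
      simp [List.getElem?_eq_getElem h1, this]
    · simp [show (p.length : Int) ≤ (k : Int) from by exact_mod_cast Nat.le_of_not_lt h1]

-- ===== VERDICT (by name: the statement is the Claim_ definition above) =====
theorem filter_patterns_spec : Claim_equal_filter_patterns := by
  intro patterns current _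
  unfold Spec_filter_patterns filter_patterns filter_patterns_alt
  rw [PySem.List.foldl_append_if_eq_filter, sieve_eq_filter]
  simp only [List.nil_append]
  apply List.filter_congr
  intro p _
  rw [Bool.eq_iff_iff, pvCheckA_iff, pvAllB_iff]
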